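-- pv_equiv track=rewrite | github.com/pth573/Python-Code-PTIT | PY01039.py | solve
-- ===== SOURCE A (Python) =====
-- def solve(n):
--     x = n[0]
--     y = n[1]
--     for i in range(len(n)):
--         if i % 2 == 0:
--             if x != n[i]:
--                 return 0
--         else:
--             if y != n[i]:
--                 return 0
--     return 1
-- ===== SOURCE B (Python) =====
-- def solve(n):
--     x, y = n[0], n[1]
--     return int(set(n[::2]) == {x} and set(n[1::2]) == {y})
-- ===== Notes on version B (the rewrite author's own statement) =====
-- stated objective: simpler
-- what changed: Instead of one indexed loop branching on the index parity with early returns, B splits the list into its two strided slices (even positions and odd positions), builds the set of distinct values of each stride, and compares each set with the singleton of its expected first element.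
import Mathlib
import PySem

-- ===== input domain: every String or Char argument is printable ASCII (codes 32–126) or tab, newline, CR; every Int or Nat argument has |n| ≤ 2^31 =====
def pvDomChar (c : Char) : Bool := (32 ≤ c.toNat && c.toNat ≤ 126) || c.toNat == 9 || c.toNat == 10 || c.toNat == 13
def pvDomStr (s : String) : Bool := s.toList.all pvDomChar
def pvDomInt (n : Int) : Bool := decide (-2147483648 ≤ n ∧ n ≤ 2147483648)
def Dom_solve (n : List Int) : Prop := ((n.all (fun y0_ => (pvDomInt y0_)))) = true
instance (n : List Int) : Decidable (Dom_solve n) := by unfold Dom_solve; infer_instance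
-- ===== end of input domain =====

-- B replaces A's single indexed loop branching on i%2 by splitting the list into the two
-- two strided slices (even and odd positions) and comparing the set of distinct values of each stride
-- with the singleton of its expected value; objective: simpler.

-- ===== PORT A =====
-- the for-loop with its early 'return 0', over the remaining indices
def solveLoop (n : List Int) (x y : Int) : List Int → Int
  | [] => 1
  | i :: rest =>
    if PySem.Int.mod i 2 = 0 then
      if x ≠ PySem.List.pyGetD n i 0 then 0 else solveLoop n x y rest
    else
      if y ≠ PySem.List.pyGetD n i 0 then 0 else solveLoop n x y rest

def solve (n : List Int) : Int :=
  match PySem.List.pyGet? n 0, PySem.List.pyGet? n 1 with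
  | some x, some y => solveLoop n x y (PySem.List.pyRange 0 n.length 1)
  | _, _ => 0   -- IndexError in Python; unreachable under Pre_solve

-- ===== PORT B =====
-- the distinct values of each stride compared with a singleton; the slices have step 2 ≠ 0, so slice? is
-- always 'some' and '.getD []' is exact (Python step-2 slicing never raises).
def solve_alt (n : List Int) : Int :=
  match PySem.List.pyGet? n 0 with
  | none => 0   -- IndexError in Python; unreachable under Pre_solve
  | some x =>
  match PySem.List.pyGet? n 1 with
  | none => 0   -- IndexError in Python; unreachable under Pre_solve
  | some y =>
    if PySem.Set.equal (PySem.Set.ofList ((PySem.List.slice? n none none 2).getD []))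
         (PySem.Set.ofList [x]) &&
       PySem.Set.equal (PySem.Set.ofList ((PySem.List.slice? n (some 1) none 2).getD []))
         (PySem.Set.ofList [y]) then 1 else 0

-- ===== PRECONDITION & SPEC =====
-- A indexes the first two elements unconditionally, so it raises IndexError on lists shorter than 2.
def Pre_solve (n : List Int) : Prop := 2 ≤ n.length
instance (n : List Int) : Decidable (Pre_solve n) := by unfold Pre_solve; infer_instance
def pvWitness_solve : List Int := [3, 7, 3, 7]

def Spec_solve (n : List Int) (out : Int) : Prop := out = solve_alt n
instance (n : List Int) (out : Int) : Decidable (Spec_solve n out) := by unfold Spec_solve; infer_instance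

-- ===== CLAIM (what is proved, stated in full; the proofs are below) =====
def Claim_equal_solve : Prop := ∀ (n : List Int), Dom_solve n → Pre_solve n → Spec_solve n (solve n)

-- ===== LEMMAS AND PROOFS =====

-- A's loop returns only 0 or 1
lemma solveLoop_cases (n : List Int) (x y : Int) (l : List Int) :
    solveLoop n x y l = 0 ∨ solveLoop n x y l = 1 := by
  induction l with
  | nil => right; rfl
  | cons i rest ih =>
    simp only [solveLoop]
    split_ifs <;> first | (left; rfl) | exact ih

-- A's loop over range(i, len(n)) returns 1 iff every remaining position matches its parity's value
lemma solveLoop_eq_one_iff (n : List Int) (x y : Int) : ∀ (i : Nat),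
    (solveLoop n x y (PySem.List.pyRange i n.length 1) = 1 ↔
      ∀ j : Nat, i ≤ j → j < n.length → n.getD j 0 = (if j % 2 = 0 then x else y)) := by
  intro i
  by_cases h : i < n.length
  · rw [PySem.List.pyRange_one_cons (by exact_mod_cast h)]
    have hstep : ((i : Int) + 1) = ((i + 1 : Nat) : Int) := by push_cast; ring
    rw [hstep]
    have ih := solveLoop_eq_one_iff n x y (i + 1)
    simp only [solveLoop]
    have hmod : PySem.Int.mod (i : Int) 2 = ((i % 2 : Nat) : Int) := by
      exact_mod_cast PySem.Int.mod_natCast i 2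
    have hget : PySem.List.pyGetD n (i : Int) 0 = n.getD i 0 := by
      simp [PySem.List.pyGetD_natCast]
    by_cases hpar : i % 2 = 0
    · rw [if_pos (by rw [hmod, hpar]; rfl)]
      by_cases heq : x = n.getD i 0
      · rw [if_neg (by rw [hget]; simpa using heq), ih]
        constructor
        · intro hall j hij hj
          rcases Nat.eq_or_lt_of_le hij with rfl | hlt
          · rw [if_pos hpar]; exact heq.symm
          · exact hall j hlt hj
        · intro hall j hij hj; exact hall j (Nat.le_of_succ_le hij) hj
      · rw [if_pos (by rw [hget]; simpa using heq)]
        constructor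
        · intro h01; exact absurd h01 (by norm_num)
        · intro hall
          have := hall i le_rfl h
          rw [if_pos hpar] at this
          exact absurd this.symm heq
    · rw [if_neg (by rw [hmod]; intro hc; apply hpar; exact_mod_cast hc)]
      by_cases heq : y = n.getD i 0
      · rw [if_neg (by rw [hget]; simpa using heq), ih]
        constructor
        · intro hall j hij hj
          rcases Nat.eq_or_lt_of_le hij with rfl | hlt
          · rw [if_neg hpar]; exact heq.symm
          · exact hall j hlt hj
        · intro hall j hij hj; exact hall j (Nat.le_of_succ_le hij) hj
      · rw [if_pos (by rw [hget]; simpa using heq)]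
        constructor
        · intro h01; exact absurd h01 (by norm_num)
        · intro hall
          have := hall i le_rfl h
          rw [if_neg hpar] at this
          exact absurd this.symm heq
  · rw [PySem.List.pyRange_one_eq_nil (by exact_mod_cast Nat.le_of_not_lt h)]
    simp only [solveLoop]
    constructor
    · intro _ j hij hj; omega
    · intro _; trivial
termination_by i => n.length - i
decreasing_by omega

-- membership in the even-position stride n[::2]
lemma mem_evens (n : List Int) (v : Int) :
    v ∈ (PySem.List.slice? n none none 2).getD [] ↔ ∃ k : Nat, n[2 * k]? = some v := by
  simp only [PySem.List.slice?, PySem.List.sliceIndices]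
  norm_num
  constructor
  · rintro ⟨k, hk, hget⟩
    exact ⟨k, by rwa [show ((2:Int) * (k:Int)).toNat = 2 * k by omega] at hget⟩
  · rintro ⟨k, hget⟩
    have hlt : 2 * k < n.length := by
      by_contra hge
      rw [List.getElem?_eq_none (by omega)] at hget
      simp at hget
    refine ⟨k, ?_, by rwa [show ((2:Int) * (k:Int)).toNat = 2 * k by omega]⟩
    split_ifs with h0 <;> omega
-- membership in the odd-position stride n[1::2] (start clamps to 1 when the list is nonempty)
lemma mem_odds (n : List Int) (v : Int) (hlen : 1 ≤ n.length) :
    v ∈ (PySem.List.slice? n (some 1) none 2).getD [] ↔ ∃ k : Nat, n[1 + 2 * k]? = some v := by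
  simp only [PySem.List.slice?, PySem.List.sliceIndices]
  norm_num
  rw [min_eq_left (by exact_mod_cast hlen)]
  constructor
  · rintro ⟨k, hk, hget⟩
    exact ⟨k, by rwa [show ((1:Int) + 2 * (k:Int)).toNat = 1 + 2 * k by omega] at hget⟩
  · rintro ⟨k, hget⟩
    have hlt : 1 + 2 * k < n.length := by
      by_contra hge
      rw [List.getElem?_eq_none (by omega)] at hget
      simp at hget
    refine ⟨k, ?_, by rwa [show ((1:Int) + 2 * (k:Int)).toNat = 1 + 2 * k by omega]⟩
    split_ifs with h0 <;> omega

-- Python's set(l) == {x}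
lemma setEqual_singleton (l : List Int) (x : Int) :
    (PySem.Set.equal (PySem.Set.ofList l) (PySem.Set.ofList [x]) = true) ↔
      ((∀ v ∈ l, v = x) ∧ x ∈ l) := by
  simp only [PySem.Set.equal, Bool.and_eq_true, PySem.Set.issubset_iff]
  constructor
  · rintro ⟨h1, h2⟩
    constructor
    · intro v hv
      have := h1 v ((PySem.Set.mem_ofList l v).mpr hv)
      simpa [PySem.Set.ofList] using this
    · have := h2 x (by simp [PySem.Set.ofList])
      exact (PySem.Set.mem_ofList l x).mp this
  · rintro ⟨h1, h2⟩
    constructor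
    · intro v hv
      have := h1 v ((PySem.Set.mem_ofList l v).mp hv)
      simp [PySem.Set.ofList, this]
    · intro v hv
      have : v = x := by simpa [PySem.Set.ofList] using hv
      exact (PySem.Set.mem_ofList l v).mpr (this ▸ h2)

-- ===== VERDICT (by name: the statement is the Claim_ definition above) =====
theorem solve_spec : Claim_equal_solve := by
  intro n _ hpre
  unfold Spec_solve solve solve_alt
  have h2 : 2 ≤ n.length := hpre
  have h0lt : 0 < n.length := by omega
  have h1lt : 1 < n.length := by omega
  have h0 : PySem.List.pyGet? n 0 = some (n.getD 0 0) := by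
    rw [show (0 : Int) = ((0 : Nat) : Int) from rfl, PySem.List.pyGet?_natCast]
    simp [List.getD_eq_getElem?_getD, List.getElem?_eq_getElem h0lt]
  have h1 : PySem.List.pyGet? n 1 = some (n.getD 1 0) := by
    rw [show (1 : Int) = ((1 : Nat) : Int) from rfl, PySem.List.pyGet?_natCast]
    simp [List.getD_eq_getElem?_getD, List.getElem?_eq_getElem h1lt]
  rw [h0, h1]
  dsimp only
  set x := n.getD 0 0 with hx
  set y := n.getD 1 0 with hy
  have hzero : (0 : Int) = ((0 : Nat) : Int) := rfl
  have hloop := solveLoop_eq_one_iff n x y 0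
  rw [hzero] at *
  -- B's if-condition ↔ the parity characterisation
  have hBiff :
      ((PySem.Set.equal (PySem.Set.ofList ((PySem.List.slice? n none none 2).getD []))
          (PySem.Set.ofList [x]) &&
        PySem.Set.equal (PySem.Set.ofList ((PySem.List.slice? n (some 1) none 2).getD []))
          (PySem.Set.ofList [y])) = true) ↔
      (∀ j : Nat, 0 ≤ j → j < n.length → n.getD j 0 = (if j % 2 = 0 then x else y)) := by
    rw [Bool.and_eq_true, setEqual_singleton, setEqual_singleton]
    constructor
    · rintro ⟨⟨hev, _⟩, ⟨hod, _⟩⟩ j _ hj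
      have hget : n[j]? = some (n.getD j 0) := by
        simp [List.getD_eq_getElem?_getD, List.getElem?_eq_getElem hj]
      by_cases hpar : j % 2 = 0
      · rw [if_pos hpar]
        apply hev
        rw [mem_evens]
        exact ⟨j / 2, by rwa [show 2 * (j / 2) = j by omega]⟩
      · rw [if_neg hpar]
        apply hod
        rw [mem_odds n _ (by omega)]
        exact ⟨j / 2, by rwa [show 1 + 2 * (j / 2) = j by omega]⟩
    · intro hall
      refine ⟨⟨?_, ?_⟩, ?_, ?_⟩
      · intro v hv
        obtain ⟨k, hk⟩ := (mem_evens n v).mp hv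
        have hlt : 2 * k < n.length := by
          by_contra hge
          rw [List.getElem?_eq_none (by omega)] at hk
          simp at hk
        have := hall (2 * k) (Nat.zero_le _) hlt
        rw [if_pos (by omega)] at this
        rw [List.getD_eq_getElem?_getD, hk] at this
        simpa using this
      · rw [mem_evens]
        refine ⟨0, ?_⟩
        simp only [Nat.mul_zero]
        rw [List.getElem?_eq_getElem h0lt]
        simp [hx, List.getD_eq_getElem?_getD, List.getElem?_eq_getElem h0lt]
      · intro v hv
        obtain ⟨k, hk⟩ := (mem_odds n v (by omega)).mp hv
        have hlt : 1 + 2 * k < n.length := by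
          by_contra hge
          rw [List.getElem?_eq_none (by omega)] at hk
          simp at hk
        have := hall (1 + 2 * k) (Nat.zero_le _) hlt
        rw [if_neg (by omega)] at this
        rw [List.getD_eq_getElem?_getD, hk] at this
        simpa using this
      · rw [mem_odds n _ (by omega)]
        refine ⟨0, ?_⟩
        simp only [Nat.mul_zero, Nat.add_zero]
        rw [List.getElem?_eq_getElem h1lt]
        simp [hy, List.getD_eq_getElem?_getD, List.getElem?_eq_getElem h1lt]
  by_cases hb :
      ((PySem.Set.equal (PySem.Set.ofList ((PySem.List.slice? n none none 2).getD []))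
          (PySem.Set.ofList [x]) &&
        PySem.Set.equal (PySem.Set.ofList ((PySem.List.slice? n (some 1) none 2).getD []))
          (PySem.Set.ofList [y])) = true)
  · rw [if_pos hb]
    exact hloop.mpr (hBiff.mp hb)
  · rw [if_neg hb]
    rcases solveLoop_cases n x y (PySem.List.pyRange ((0:Nat):Int) n.length 1) with hz | ho
    · exact hz
    · exact absurd (hBiff.mpr (hloop.mp ho)) hb
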